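-- pv_equiv track=rewrite | github.com/sindarin-inc/kindle-automator | views/core/avd_profile_manager.py | get_compatible_system_image
-- ===== SOURCE A (Python) =====
-- from typing import Dict, List, Optional, Tuple
--
-- def get_compatible_system_image(available_images: List[str]) -> Optional[str]:
--     """
--     Get the most compatible system image based on host architecture.
--
--     Args:
--         available_images: List of available system images
--
--     Returns:
--         Optional[str]: Most compatible system image or None if not found
--     """
--     # Important: Even on ARM Macs (M1/M2/M4), we need to use x86_64 images
--     # because the ARM64 emulation in Android emulator is not fully supported yet.
--     # The emulator will use Rosetta 2 to translate x86_64 to ARM.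
--
--     # First choice: Android 30 with Google Play Store (x86_64)
--     for img in available_images:
--         if "system-images;android-30;google_apis_playstore;x86_64" in img:
--             return img
--
--     # Second choice: Android 30 with Google APIs (x86_64)
--     for img in available_images:
--         if "system-images;android-30;google_apis;x86_64" in img:
--             return img
--
--     # Third choice: Any Android 30 x86_64 image
--     for img in available_images:
--         if "system-images;android-30;" in img and "x86_64" in img:
--             return img
--
--     # Fourth choice: Any modern Android x86_64 image
--     for img in available_images:
--         if "x86_64" in img:
--             return img
--
--     # Fallback to any image
--     if available_images:
--         return available_images[0]
--
--     return None
-- ===== SOURCE B (Python) =====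
-- from typing import List, Optional
--
--
-- def _rank(img: str) -> int:
--     if "system-images;android-30;google_apis_playstore;x86_64" in img:
--         return 1
--     if "system-images;android-30;google_apis;x86_64" in img:
--         return 2
--     if "system-images;android-30;" in img and "x86_64" in img:
--         return 3
--     if "x86_64" in img:
--         return 4
--     return 5
--
--
-- def get_compatible_system_image(available_images: List[str]) -> Optional[str]:
--     best = None  # (rank, image); keep first image of the smallest rank
--     for img in available_images:
--         r = _rank(img)
--         if best is None or r < best[0]:
--             best = (r, img)
--     return best[1] if best is not None else None
-- ===== Notes on version B (the rewrite author's own statement) =====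
-- stated objective: alternative
-- what changed: Replaces four sequential scans plus a fallback with a single pass that ranks each image once and keeps the first image of minimal rank.
import Mathlib
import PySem

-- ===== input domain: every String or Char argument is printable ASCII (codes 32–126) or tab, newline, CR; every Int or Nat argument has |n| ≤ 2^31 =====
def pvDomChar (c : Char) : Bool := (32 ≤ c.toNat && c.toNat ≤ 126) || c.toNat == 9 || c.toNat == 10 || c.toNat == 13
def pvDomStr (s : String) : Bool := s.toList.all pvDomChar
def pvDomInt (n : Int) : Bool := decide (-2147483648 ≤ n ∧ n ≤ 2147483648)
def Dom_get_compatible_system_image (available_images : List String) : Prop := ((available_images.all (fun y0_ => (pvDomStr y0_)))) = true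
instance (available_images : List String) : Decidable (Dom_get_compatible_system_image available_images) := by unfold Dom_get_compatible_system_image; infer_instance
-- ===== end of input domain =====

-- B replaces A's four sequential scans plus a fallback by a single pass that ranks each
-- image once and keeps the first image of minimal rank (objective: alternative algorithm).

-- ===== PORT A =====
-- 'for img in xs: if p(img): return img' as structural recursion
def pvScan (p : String → Bool) : List String → Option String
  | [] => none
  | x :: xs => if p x then some x else pvScan p xs

def get_compatible_system_image (available_images : List String) : Option String :=
  match pvScan (fun img => PySem.Str.isIn "system-images;android-30;google_apis_playstore;x86_64" img) available_images with
  | some img => some img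
  | none =>
    match pvScan (fun img => PySem.Str.isIn "system-images;android-30;google_apis;x86_64" img) available_images with
    | some img => some img
    | none =>
      match pvScan (fun img => PySem.Str.isIn "system-images;android-30;" img && PySem.Str.isIn "x86_64" img) available_images with
      | some img => some img
      | none =>
        match pvScan (fun img => PySem.Str.isIn "x86_64" img) available_images with
        | some img => some img
        | none =>
          match available_images with
          | [] => none
          | x :: _ => some x

-- ===== PORT B =====
def pvRank (img : String) : Nat :=
  if PySem.Str.isIn "system-images;android-30;google_apis_playstore;x86_64" img then 1
  else if PySem.Str.isIn "system-images;android-30;google_apis;x86_64" img then 2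
  else if PySem.Str.isIn "system-images;android-30;" img && PySem.Str.isIn "x86_64" img then 3
  else if PySem.Str.isIn "x86_64" img then 4
  else 5

def pvStep (best : Option (Nat × String)) (img : String) : Option (Nat × String) :=
  match best with
  | none => some (pvRank img, img)
  | some (r, b) => if pvRank img < r then some (pvRank img, img) else some (r, b)

def get_compatible_system_image_alt (available_images : List String) : Option String :=
  (available_images.foldl pvStep none).map (·.2)

-- ===== PRECONDITION & SPEC =====
def Spec_get_compatible_system_image (available_images : List String) (out : Option String) : Prop := out = get_compatible_system_image_alt available_images
instance (available_images : List String) (out : Option String) : Decidable (Spec_get_compatible_system_image available_images out) := by unfold Spec_get_compatible_system_image; infer_instance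

-- ===== CLAIM (what is proved, stated in full; the proofs are below) =====
def Claim_equal_get_compatible_system_image : Prop := ∀ (available_images : List String), Dom_get_compatible_system_image available_images → Spec_get_compatible_system_image available_images (get_compatible_system_image available_images)

-- ===== LEMMAS AND PROOFS =====

-- minimal rank over a list (5 if empty; every rank is between 1 and 5)
def pvMrk (xs : List String) : Nat := xs.foldr (fun y m => min (pvRank y) m) 5

theorem pvScan_eq_find? (p : String → Bool) (xs : List String) : pvScan p xs = xs.find? p := by
  induction xs with
  | nil => rfl
  | cons x xs ih => by_cases h : p x <;> simp [pvScan, List.find?, h, ih]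

theorem pvRank_ge_one (y : String) : 1 ≤ pvRank y := by
  unfold pvRank; split_ifs <;> omega

theorem pvRank_le_five (y : String) : pvRank y ≤ 5 := by
  unfold pvRank; split_ifs <;> omega

theorem pvMrk_cons (x : String) (xs : List String) :
    pvMrk (x :: xs) = min (pvRank x) (pvMrk xs) := rfl

theorem pvMrk_le_five (xs : List String) : pvMrk xs ≤ 5 := by
  induction xs with
  | nil => simp [pvMrk]
  | cons x xs ih => rw [pvMrk_cons]; omega

theorem pvMrk_le_of_mem {xs : List String} {y : String} (h : y ∈ xs) : pvMrk xs ≤ pvRank y := by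
  induction xs with
  | nil => cases h
  | cons x xs ih =>
    rw [pvMrk_cons]
    rcases List.mem_cons.mp h with rfl | h
    · omega
    · have := ih h; omega

theorem pvMrk_achieved {xs : List String} (h : xs ≠ []) : ∃ c ∈ xs, pvRank c = pvMrk xs := by
  induction xs with
  | nil => exact absurd rfl h
  | cons x xs ih =>
    rw [pvMrk_cons]
    rcases eq_or_ne xs [] with rfl | hne
    · exact ⟨x, List.mem_cons_self, by have := pvRank_le_five x; simp [pvMrk]; omega⟩
    · rcases ih hne with ⟨c, hc, hrc⟩
      by_cases hx : pvRank x ≤ pvMrk xs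
      · exact ⟨x, List.mem_cons_self, by omega⟩
      · exact ⟨c, List.mem_cons_of_mem _ hc, by omega⟩

theorem pvMrk_lt_of_forall {xs : List String} {i : Nat} (hi : i < 5)
    (h : ∀ y ∈ xs, i < pvRank y) : i < pvMrk xs := by
  induction xs with
  | nil => simpa [pvMrk] using hi
  | cons x xs ih =>
    rw [pvMrk_cons]
    have h1 := h x List.mem_cons_self
    have h2 := ih (fun y hy => h y (List.mem_cons_of_mem _ hy))
    omega

theorem pvFind_congr_mem {p q : String → Bool} {xs : List String}
    (h : ∀ y ∈ xs, p y = q y) : xs.find? p = xs.find? q := by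
  induction xs with
  | nil => rfl
  | cons x xs ih =>
    have hx := h x List.mem_cons_self
    by_cases hp : p x
    · simp [List.find?, hp, hx ▸ hp]
    · have hq : q x = false := by rw [← hx]; simpa using hp
      simp [List.find?, hp, hq]
      exact ih (fun y hy => h y (List.mem_cons_of_mem _ hy))

-- rank characterisations (pointwise, no side conditions)
theorem pvRank_eq_one_iff (y : String) :
    (pvRank y == 1) = PySem.Str.isIn "system-images;android-30;google_apis_playstore;x86_64" y := by
  unfold pvRank; split_ifs <;> simp_all

theorem pvRank_eq_two_iff {y : String}
    (h1 : PySem.Str.isIn "system-images;android-30;google_apis_playstore;x86_64" y = false) :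
    (pvRank y == 2) = PySem.Str.isIn "system-images;android-30;google_apis;x86_64" y := by
  unfold pvRank; split_ifs <;> simp_all

theorem pvRank_eq_three_iff {y : String}
    (h1 : PySem.Str.isIn "system-images;android-30;google_apis_playstore;x86_64" y = false)
    (h2 : PySem.Str.isIn "system-images;android-30;google_apis;x86_64" y = false) :
    (pvRank y == 3) = (PySem.Str.isIn "system-images;android-30;" y && PySem.Str.isIn "x86_64" y) := by
  unfold pvRank; split_ifs <;> simp_all

theorem pvRank_eq_four_iff {y : String}
    (h1 : PySem.Str.isIn "system-images;android-30;google_apis_playstore;x86_64" y = false)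
    (h2 : PySem.Str.isIn "system-images;android-30;google_apis;x86_64" y = false)
    (h3 : (PySem.Str.isIn "system-images;android-30;" y && PySem.Str.isIn "x86_64" y) = false) :
    (pvRank y == 4) = PySem.Str.isIn "x86_64" y := by
  unfold pvRank; split_ifs <;> simp_all

-- the common reference: first element of minimal rank
def pvRef (xs : List String) : Option String := xs.find? (fun y => pvRank y == pvMrk xs)

theorem A_eq_ref (xs : List String) : get_compatible_system_image xs = pvRef xs := by
  unfold get_compatible_system_image pvRef
  rw [pvScan_eq_find?, pvScan_eq_find?, pvScan_eq_find?, pvScan_eq_find?]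
  cases h1 : xs.find? (fun img => PySem.Str.isIn "system-images;android-30;google_apis_playstore;x86_64" img) with
  | some v =>
    have hv := List.find?_some h1
    have hmem := List.mem_of_find?_eq_some h1
    have hm : pvMrk xs = 1 := by
      have hub := pvMrk_le_of_mem hmem
      have hrv : pvRank v = 1 := by
        unfold pvRank; rw [if_pos (by simpa [PySem.Str.isIn] using hv)]
      have hge : ∀ y ∈ xs, 0 < pvRank y := fun y _ => pvRank_ge_one y
      have := pvMrk_lt_of_forall (by omega : (0:Nat) < 5) hge
      omega
    have hfind : xs.find? (fun y => pvRank y == pvMrk xs) = some v := by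
      rw [hm, pvFind_congr_mem (fun y _ => pvRank_eq_one_iff y)]
      exact h1
    rw [hfind]
  | none =>
    have hn1 : ∀ y ∈ xs, PySem.Str.isIn "system-images;android-30;google_apis_playstore;x86_64" y = false := by
      intro y hy
      have := List.find?_eq_none.mp h1 y hy
      simpa using this
    cases h2 : xs.find? (fun img => PySem.Str.isIn "system-images;android-30;google_apis;x86_64" img) with
    | some v =>
      have hv := List.find?_some h2
      have hmem := List.mem_of_find?_eq_some h2
      have hm : pvMrk xs = 2 := by
        have hub := pvMrk_le_of_mem hmem
        have hrv : pvRank v = 2 := by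
          unfold pvRank
          rw [if_neg (by simpa [PySem.Str.isIn] using hn1 v hmem),
            if_pos (by simpa [PySem.Str.isIn] using hv)]
        have hlt : ∀ y ∈ xs, 1 < pvRank y := by
          intro y hy
          have h1y := hn1 y hy
          unfold pvRank; rw [if_neg (by simpa [PySem.Str.isIn] using h1y)]
          split_ifs <;> omega
        have := pvMrk_lt_of_forall (by omega : (1:Nat) < 5) hlt
        omega
      have hfind : xs.find? (fun y => pvRank y == pvMrk xs) = some v := by
        rw [hm, pvFind_congr_mem (fun y hy => pvRank_eq_two_iff (hn1 y hy))]
        exact h2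
      rw [hfind]
    | none =>
      have hn2 : ∀ y ∈ xs, PySem.Str.isIn "system-images;android-30;google_apis;x86_64" y = false := by
        intro y hy; have := List.find?_eq_none.mp h2 y hy; simpa using this
      have hlt2 : ∀ y ∈ xs, 2 < pvRank y := by
        intro y hy
        unfold pvRank
        rw [if_neg (by simpa [PySem.Str.isIn] using hn1 y hy), if_neg (by simpa [PySem.Str.isIn] using hn2 y hy)]
        split_ifs <;> omega
      cases h3 : xs.find? (fun img => PySem.Str.isIn "system-images;android-30;" img && PySem.Str.isIn "x86_64" img) with
      | some v =>
        have hv := List.find?_some h3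
        have hmem := List.mem_of_find?_eq_some h3
        have hm : pvMrk xs = 3 := by
          have hub := pvMrk_le_of_mem hmem
          have hrv : pvRank v = 3 := by
            unfold pvRank
            rw [if_neg (by simpa [PySem.Str.isIn] using hn1 v hmem), if_neg (by simpa [PySem.Str.isIn] using hn2 v hmem), if_pos (by simpa [PySem.Str.isIn] using hv)]
          have := pvMrk_lt_of_forall (by omega : (2:Nat) < 5) hlt2
          omega
        have hfind : xs.find? (fun y => pvRank y == pvMrk xs) = some v := by
          rw [hm, pvFind_congr_mem (fun y hy => pvRank_eq_three_iff (hn1 y hy) (hn2 y hy))]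
          exact h3
        rw [hfind]
      | none =>
        have hn3 : ∀ y ∈ xs, (PySem.Str.isIn "system-images;android-30;" y && PySem.Str.isIn "x86_64" y) = false := by
          intro y hy; have := List.find?_eq_none.mp h3 y hy; simpa using this
        have hlt3 : ∀ y ∈ xs, 3 < pvRank y := by
          intro y hy
          unfold pvRank
          rw [if_neg (by simpa [PySem.Str.isIn] using hn1 y hy), if_neg (by simpa [PySem.Str.isIn] using hn2 y hy), if_neg (by have h := hn3 y hy; simp [PySem.Str.isIn] at h ⊢; tauto)]
          split_ifs <;> omega
        cases h4 : xs.find? (fun img => PySem.Str.isIn "x86_64" img) with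
        | some v =>
          have hv := List.find?_some h4
          have hmem := List.mem_of_find?_eq_some h4
          have hm : pvMrk xs = 4 := by
            have hub := pvMrk_le_of_mem hmem
            have hrv : pvRank v = 4 := by
              unfold pvRank
              rw [if_neg (by simpa [PySem.Str.isIn] using hn1 v hmem), if_neg (by simpa [PySem.Str.isIn] using hn2 v hmem),
                if_neg (by have h := hn3 v hmem; simp [PySem.Str.isIn] at h ⊢; tauto), if_pos (by simpa [PySem.Str.isIn] using hv)]
            have := pvMrk_lt_of_forall (by omega : (3:Nat) < 5) hlt3
            omega
          have hfind : xs.find? (fun y => pvRank y == pvMrk xs) = some v := by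
            rw [hm, pvFind_congr_mem (fun y hy => pvRank_eq_four_iff (hn1 y hy) (hn2 y hy) (hn3 y hy))]
            exact h4
          rw [hfind]
        | none =>
          have hn4 : ∀ y ∈ xs, PySem.Str.isIn "x86_64" y = false := by
            intro y hy; have := List.find?_eq_none.mp h4 y hy; simpa using this
          have hr5 : ∀ y ∈ xs, pvRank y = 5 := by
            intro y hy
            unfold pvRank
            rw [if_neg (by simpa [PySem.Str.isIn] using hn1 y hy), if_neg (by simpa [PySem.Str.isIn] using hn2 y hy),
              if_neg (by have h := hn3 y hy; simp [PySem.Str.isIn] at h ⊢; tauto), if_neg (by simpa [PySem.Str.isIn] using hn4 y hy)]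
          cases xs with
          | nil => rfl
          | cons x xs =>
            have hm : pvMrk (x :: xs) = 5 := by
              have h1 := pvMrk_le_five (x :: xs)
              have h2 := pvMrk_lt_of_forall (i := 4) (by omega)
                (fun y hy => by have := hr5 y hy; omega)
              omega
            rw [hm]
            simp [List.find?, hr5 x List.mem_cons_self]

-- loop invariant of B's fold
theorem B_fold_spec (xs : List String) : ∀ (r : Nat) (b : String), r ≤ 5 →
    xs.foldl pvStep (some (r, b)) =
      some (min r (pvMrk xs),
            if pvMrk xs < r then (xs.find? (fun y => pvRank y == pvMrk xs)).getD b else b) := by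
  induction xs with
  | nil =>
    intro r b hr
    simp [pvMrk]
    omega
  | cons x xs ih =>
    intro r b hr
    rw [List.foldl_cons]
    by_cases hx : pvRank x < r
    · have hstep : pvStep (some (r, b)) x = some (pvRank x, x) := by
        simp [pvStep, hx]
      rw [hstep, ih (pvRank x) x (pvRank_le_five x), pvMrk_cons]
      by_cases hm : pvMrk xs < pvRank x
      · have hmin1 : min (pvRank x) (pvMrk xs) = pvMrk xs := by omega
        have hmin2 : min r (min (pvRank x) (pvMrk xs)) = pvMrk xs := by omega
        have hxs : xs ≠ [] := by
          intro h; subst h; simp [pvMrk] at hm; have := pvRank_le_five x; omega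
        rcases pvMrk_achieved hxs with ⟨c, hc, hrc⟩
        have hfind : ∃ v, xs.find? (fun y => pvRank y == pvMrk xs) = some v := by
          rcases (List.find?_isSome (p := fun y => pvRank y == pvMrk xs) (xs := xs)).mpr
            ⟨c, hc, by simp [hrc]⟩ with h
          exact Option.isSome_iff_exists.mp h
        rcases hfind with ⟨v, hv⟩
        have hpx : (pvRank x == pvMrk xs) = false := by simp; omega
        rw [hmin1]
        simp only [List.find?, hpx, hv]
        simp [hm, show pvMrk xs < r by omega]
        omega
      · have hmin1 : min (pvRank x) (pvMrk xs) = pvRank x := by omega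
        have hpx : (pvRank x == min (pvRank x) (pvMrk xs)) = true := by simp [hmin1]
        simp only [List.find?, hpx]
        simp [hm, hmin1, hx, show min r (pvRank x) = pvRank x by omega]
    · have hstep : pvStep (some (r, b)) x = some (r, b) := by
        simp [pvStep, hx]
      rw [hstep, ih r b hr, pvMrk_cons]
      have hrx : r ≤ pvRank x := by omega
      have hmin : min r (min (pvRank x) (pvMrk xs)) = min r (pvMrk xs) := by omega
      by_cases hm : pvMrk xs < r
      · have hmin1 : min (pvRank x) (pvMrk xs) = pvMrk xs := by omega
        have hpx : (pvRank x == min (pvRank x) (pvMrk xs)) = false := by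
          simp [hmin1]; omega
        simp only [List.find?, hpx]
        simp [hmin1, hm]
      · simp [hmin, hm, show ¬ (min (pvRank x) (pvMrk xs) < r) by omega]

theorem B_eq_ref (xs : List String) : get_compatible_system_image_alt xs = pvRef xs := by
  cases xs with
  | nil => rfl
  | cons x xs =>
    unfold get_compatible_system_image_alt pvRef
    rw [List.foldl_cons]
    have hstep : pvStep none x = some (pvRank x, x) := rfl
    rw [hstep, B_fold_spec xs (pvRank x) x (pvRank_le_five x), pvMrk_cons]
    by_cases hm : pvMrk xs < pvRank x
    · have hmin1 : min (pvRank x) (pvMrk xs) = pvMrk xs := by omega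
      have hxs : xs ≠ [] := by
        intro h; subst h; simp [pvMrk] at hm; have := pvRank_le_five x; omega
      rcases pvMrk_achieved hxs with ⟨c, hc, hrc⟩
      rcases Option.isSome_iff_exists.mp
        ((List.find?_isSome (p := fun y => pvRank y == pvMrk xs) (xs := xs)).mpr
          ⟨c, hc, by simp [hrc]⟩) with ⟨v, hv⟩
      have hpx : (pvRank x == pvMrk xs) = false := by simp; omega
      rw [hmin1]
      simp only [List.find?, hpx, hv]
      simp [hm]
    · have hmin1 : min (pvRank x) (pvMrk xs) = pvRank x := by omega
      have hpx : (pvRank x == min (pvRank x) (pvMrk xs)) = true := by simp [hmin1]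
      simp only [List.find?, hpx, hmin1]
      simp [hm]

-- ===== VERDICT (by name: the statement is the Claim_ definition above) =====
theorem get_compatible_system_image_spec : Claim_equal_get_compatible_system_image := by
  intro xs _
  unfold Spec_get_compatible_system_image
  rw [A_eq_ref, B_eq_ref]
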